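-- pv_equiv track=rewrite | github.com/Myunwoo/algorithm_study | implementation/programmers85962.py | solution
-- ===== SOURCE A (Python) =====
-- def solution(keymap, targets):
--     answer = []
--     dic = {}
--     for key in keymap:
--         for i in range(len(key)):
--             if key[i] not in dic:
--                 dic[key[i]] = i+1
--             elif dic[key[i]] > i+1:
--                 dic[key[i]] = i+1
--
--     for target in targets:
--         s = 0
--         isGood = True
--         for t in target:
--             if t not in dic:
--                 isGood = False
--                 break
--             s += dic[t]
--
--         if isGood:
--             answer.append(s)
--         else:
--             answer.append(-1)
--
--     return answer
-- ===== SOURCE B (Python) =====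
-- def solution(keymap, targets):
--     # No precomputed table: for each target character, scan every key for its
--     # first (= smallest) position and keep the minimum press count.
--     def best(ch):
--         b = None
--         for key in keymap:
--             for i, k in enumerate(key):
--                 if k == ch:
--                     if b is None or i + 1 < b:
--                         b = i + 1
--                     break
--         return b
--
--     def cost(target):
--         total = 0
--         for t in target:
--             m = best(t)
--             if m is None:
--                 return -1
--             total += m
--         return total
--
--     return [cost(t) for t in targets]
-- ===== Notes on version B (the rewrite author's own statement) =====
-- stated objective: alternative
-- what changed: B drops A's precomputed min-position dictionary and instead, per target character, scans every keymap string directly for the smallest (first-occurrence) position, keeping a running minimum; bad characters yield -1 via early return.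
import Mathlib
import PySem

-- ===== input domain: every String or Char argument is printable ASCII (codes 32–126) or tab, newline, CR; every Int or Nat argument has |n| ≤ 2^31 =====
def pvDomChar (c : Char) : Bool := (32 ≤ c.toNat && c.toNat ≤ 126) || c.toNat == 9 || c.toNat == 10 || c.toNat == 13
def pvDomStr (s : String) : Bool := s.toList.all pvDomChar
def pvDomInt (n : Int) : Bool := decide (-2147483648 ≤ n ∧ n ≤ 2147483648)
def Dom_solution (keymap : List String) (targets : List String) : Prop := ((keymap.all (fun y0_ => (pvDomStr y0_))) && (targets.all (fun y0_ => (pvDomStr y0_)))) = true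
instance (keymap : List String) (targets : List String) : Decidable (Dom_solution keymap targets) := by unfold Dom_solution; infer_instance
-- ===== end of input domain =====

-- B replaces A's precomputed min-position dictionary by a direct per-target-character scan of the keymap (alternative decomposition, not faster).

-- ===== PORT A =====
-- inner 'for i in range(len(key)):' loop of the dictionary build
def solnStepA (key : String) (dic : PySem.Dict Char Int) : PySem.Dict Char Int :=
  (PySem.List.pyRange 0 key.toList.length 1).foldl (fun d i =>
    let c := PySem.List.pyGetD key.toList i ' '   -- key[i]; index always in range here
    if d.contains c = false then d.insert c (i + 1)
    else if d.getD c 0 > i + 1 then d.insert c (i + 1)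
    else d) dic

-- 'for t in target:' loop with the break; returns (s, isGood)
def solnScanA (dic : PySem.Dict Char Int) : List Char → Int → Int × Bool
  | [], s => (s, true)
  | t :: ts, s =>
    if dic.contains t = false then (s, false)
    else solnScanA dic ts (s + dic.getD t 0)

def solution (keymap : List String) (targets : List String) : List Int :=
  let dic := keymap.foldl (fun d key => solnStepA key d) PySem.Dict.empty
  targets.foldl (fun answer target =>
    let r := solnScanA dic target.toList 0
    answer ++ [if r.2 then r.1 else -1]) []

-- ===== PORT B =====
-- inner 'for i, k in enumerate(key): … break' loop of best(ch)
def solnFindB : List Char → Char → Int → Option Int → Option Int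
  | [], _, _, b => b
  | k :: ks, c, i, b =>
    if k = c then
      match b with
      | none => some (i + 1)
      | some v => if i + 1 < v then some (i + 1) else b
    else solnFindB ks c (i + 1) b

def solnBestB (keymap : List String) (c : Char) : Option Int :=
  keymap.foldl (fun b key => solnFindB key.toList c 0 b) none

def solnCostB (keymap : List String) : List Char → Int → Int
  | [], total => total
  | t :: ts, total =>
    match solnBestB keymap t with
    | none => -1
    | some m => solnCostB keymap ts (total + m)

def solution_alt (keymap : List String) (targets : List String) : List Int :=
  targets.map (fun target => solnCostB keymap target.toList 0)

-- ===== PRECONDITION & SPEC =====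
def Spec_solution (keymap : List String) (targets : List String) (out : List Int) : Prop := out = solution_alt keymap targets
instance (keymap : List String) (targets : List String) (out : List Int) : Decidable (Spec_solution keymap targets out) := by unfold Spec_solution; infer_instance

-- ===== CLAIM (what is proved, stated in full; the proofs are below) =====
def Claim_equal_solution : Prop := ∀ (keymap : List String) (targets : List String), Dom_solution keymap targets → Spec_solution keymap targets (solution keymap targets)

-- ===== LEMMAS AND PROOFS =====

-- proof-side restatement of A's inner loop as structural recursion over the characters
def solnStepL : List Char → Int → PySem.Dict Char Int → PySem.Dict Char Int
  | [], _, d => d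
  | c :: cs, i, d =>
    solnStepL cs (i + 1)
      (if d.contains c = false then d.insert c (i + 1)
       else if d.getD c 0 > i + 1 then d.insert c (i + 1)
       else d)

theorem solnStepA_eq_stepL_aux (xs : List Char) :
    ∀ (suf pre : List Char), xs = pre ++ suf → ∀ d,
      (PySem.List.pyRange (pre.length : Int) (xs.length : Int) 1).foldl (fun d i =>
        let c := PySem.List.pyGetD xs i ' '
        if d.contains c = false then d.insert c (i + 1)
        else if d.getD c 0 > i + 1 then d.insert c (i + 1)
        else d) d = solnStepL suf (pre.length : Int) d := by
  intro suf
  induction suf with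
  | nil =>
    intro pre h d
    subst h
    simp [PySem.List.pyRange_one_eq_nil, solnStepL]
  | cons c cs ih =>
    intro pre h d
    have hlt : (pre.length : Int) < (xs.length : Int) := by
      subst h; simp
    rw [PySem.List.pyRange_one_cons hlt]
    have hget : PySem.List.pyGetD xs (pre.length : Int) ' ' = c := by
      subst h
      rw [PySem.List.pyGetD_natCast]
      simp [List.getD]
    have := ih (pre ++ [c]) (by simp [h]) 
    simp only [List.length_append, List.length_singleton] at this
    simp only [List.foldl_cons, hget, solnStepL]
    have hcast : ((pre.length : Int) + 1) = ((pre.length + 1 : Nat) : Int) := by push_cast; ring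
    rw [hcast]
    exact this _

theorem solnStepA_eq_stepL (key : String) (d : PySem.Dict Char Int) :
    solnStepA key d = solnStepL key.toList 0 d := by
  have := solnStepA_eq_stepL_aux key.toList key.toList [] (by simp) d
  simpa [solnStepA] using this

-- once a value ≤ i+1 is stored, later positions never improve it
theorem solnFindB_stable : ∀ (ks : List Char) (c : Char) (i v : Int), v ≤ i + 1 →
    solnFindB ks c i (some v) = some v := by
  intro ks
  induction ks with
  | nil => intro c i v h; rfl
  | cons k ks ih =>
    intro c i v h
    simp only [solnFindB]
    by_cases hk : k = c
    · rw [if_pos hk, if_neg (by omega : ¬ (i + 1 < v))]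
    · rw [if_neg hk]
      exact ih c (i + 1) v (by omega)

theorem get_solnStepL : ∀ (cs : List Char) (i : Int) (d : PySem.Dict Char Int) (c : Char),
    (solnStepL cs i d).get? c = solnFindB cs c i (d.get? c) := by
  intro cs
  induction cs with
  | nil => intro i d c; rfl
  | cons k ks ih =>
    intro i d c
    simp only [solnStepL, solnFindB]
    rw [ih]
    by_cases hk : k = c
    · subst hk
      rw [if_pos rfl]
      by_cases hc : d.contains k = false
      · have hg : d.get? k = none := (PySem.Dict.get?_eq_none_iff_contains d k).mpr hc
        rw [if_pos hc, hg, PySem.Dict.get?_insert_self]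
        exact solnFindB_stable ks k (i + 1) (i + 1) (by omega)
      · have hg : ∃ v, d.get? k = some v := by
          cases hgg : d.get? k with
          | none => exact absurd ((PySem.Dict.get?_eq_none_iff_contains d k).mp hgg) hc
          | some v => exact ⟨v, rfl⟩
        obtain ⟨v, hg⟩ := hg
        rw [if_neg hc, PySem.Dict.getD_of_get?_eq_some d 0 hg]
        by_cases hvi : v > i + 1
        · rw [if_pos hvi, PySem.Dict.get?_insert_self,
            solnFindB_stable ks k (i + 1) (i + 1) (by omega)]
          simp [hg, show i + 1 < v from by omega]
        · rw [if_neg hvi, hg, solnFindB_stable ks k (i + 1) v (by omega)]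
          simp [show ¬ (i + 1 < v) from by omega]
    · rw [if_neg hk]
      congr 1
      split_ifs <;> simp [PySem.Dict.get?_insert_of_ne _ _ (fun h => hk h.symm)]

theorem get_build : ∀ (km : List String) (d : PySem.Dict Char Int) (b : Option Int) (c : Char),
    d.get? c = b →
    (km.foldl (fun d key => solnStepA key d) d).get? c =
      km.foldl (fun b key => solnFindB key.toList c 0 b) b := by
  intro km
  induction km with
  | nil => intro d b c h; simpa using h
  | cons key km ih =>
    intro d b c h
    simp only [List.foldl_cons]
    apply ih
    rw [solnStepA_eq_stepL, get_solnStepL, h]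

theorem scan_eq (dic : PySem.Dict Char Int) (keymap : List String)
    (hdic : ∀ c, dic.get? c = solnBestB keymap c) :
    ∀ (ts : List Char) (s : Int),
      (if (solnScanA dic ts s).2 then (solnScanA dic ts s).1 else -1) = solnCostB keymap ts s := by
  intro ts
  induction ts with
  | nil => intro s; rfl
  | cons t ts ih =>
    intro s
    simp only [solnScanA, solnCostB]
    cases hb : solnBestB keymap t with
    | none =>
      have hct : dic.contains t = false := by
        exact (PySem.Dict.get?_eq_none_iff_contains dic t).mp (by rw [hdic t, hb])
      simp [hct]
    | some m =>
      have hgs : dic.get? t = some m := by rw [hdic t, hb]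
      have hct : dic.contains t = true := by
        rw [PySem.Dict.contains_eq_isSome_get?, hgs]; rfl
      have hgd : dic.getD t 0 = m := PySem.Dict.getD_of_get?_eq_some dic 0 hgs
      simp only [hct, hgd, Bool.true_eq_false, if_false]
      exact ih (s + m)

-- ===== VERDICT (by name: the statement is the Claim_ definition above) =====
theorem solution_spec : Claim_equal_solution := by
  intro keymap targets _
  unfold Spec_solution solution solution_alt
  rw [PySem.List.foldl_append_singleton_eq_map]
  apply List.map_congr_left
  intro target _
  exact scan_eq _ keymap
    (fun c => get_build keymap PySem.Dict.empty none c (PySem.Dict.get?_empty c))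
    target.toList 0
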